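-- pv_equiv track=rewrite | github.com/Enddol/lotto-android | main.py | frequency_counts
-- ===== SOURCE A (Python) =====
-- from collections import Counter
--
-- def frequency_counts(rows, recent_k=0):
--     # rows: [{"round":..., "nums":[..]}]
--     target = rows[-recent_k:] if (recent_k and recent_k > 0) else rows
--     cnt = Counter()
--     for r in target:
--         for n in r["nums"]:
--             if 1 <= n <= 45:
--                 cnt[n] += 1
--     # return list of counts indexed 1..45
--     return [cnt.get(i, 0) for i in range(1, 46)]
-- ===== SOURCE B (Python) =====
-- def frequency_counts(rows, recent_k=0):
--     target = rows[-recent_k:] if (recent_k and recent_k > 0) else rows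
--     flat = sorted(n for r in target for n in r["nums"] if 1 <= n <= 45)
--     out = []
--     idx = 0
--     for i in range(1, 46):
--         start = idx
--         while idx < len(flat) and flat[idx] == i:
--             idx += 1
--         out.append(idx - start)
--     return out
-- ===== Notes on version B (the rewrite author's own statement) =====
-- stated objective: alternative
-- what changed: Replaces A's Counter hash-table tally plus per-key lookup with sort-then-scan: the in-range numbers are flattened and sorted once, and a single pointer advances over each run of equal values to emit the 45 counts in order.
import Mathlib
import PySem

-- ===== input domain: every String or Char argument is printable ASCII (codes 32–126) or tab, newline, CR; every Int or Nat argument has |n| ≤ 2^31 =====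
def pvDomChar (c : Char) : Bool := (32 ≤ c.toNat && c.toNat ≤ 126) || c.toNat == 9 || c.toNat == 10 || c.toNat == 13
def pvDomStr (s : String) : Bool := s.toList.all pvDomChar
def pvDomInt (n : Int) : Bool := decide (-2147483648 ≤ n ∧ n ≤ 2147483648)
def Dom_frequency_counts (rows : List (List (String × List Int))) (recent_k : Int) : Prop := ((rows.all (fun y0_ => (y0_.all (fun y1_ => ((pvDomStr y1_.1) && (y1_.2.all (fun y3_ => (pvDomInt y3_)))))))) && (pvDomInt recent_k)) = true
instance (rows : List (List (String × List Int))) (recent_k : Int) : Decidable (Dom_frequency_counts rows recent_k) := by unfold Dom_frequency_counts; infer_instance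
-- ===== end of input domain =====

-- Header: B replaces A's Counter-table build with sort-then-scan: it sorts the in-range
-- numbers once and reads off each count 1..45 with a single advancing pointer (alternative algorithm).
-- ===== PORT A =====
def frequency_counts (rows : List (List (String × List Int))) (recent_k : Int) : List Int :=
  let target := if recent_k ≠ 0 ∧ 0 < recent_k then PySem.List.slice rows (some (-recent_k)) none else rows
  let cnt := target.foldl
    (fun d r =>
      (((PySem.Dict.mk r).get? "nums").getD []).foldl
        (fun d n => if 1 ≤ n ∧ n ≤ 45 then d.modify n 0 (· + 1) else d) d)
    PySem.Dict.empty
  (PySem.List.pyRange 1 46 1).map (fun i => cnt.getD i 0)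

-- ===== PORT B =====
-- sorted(... generator with range guard ...), then for i in 1..45 a while loop advances the
-- pointer over the run of i's; the state (out, suffix of flat from idx) mirrors (out, idx).
def frequency_counts_alt (rows : List (List (String × List Int))) (recent_k : Int) : List Int :=
  let target := if recent_k ≠ 0 ∧ 0 < recent_k then PySem.List.slice rows (some (-recent_k)) none else rows
  let flat := PySem.List.sorted
    (target.flatMap (fun r =>
      (((PySem.Dict.mk r).get? "nums").getD []).filter (fun n => decide (1 ≤ n ∧ n ≤ 45))))
    (fun x => x) false
  let st := (PySem.List.pyRange 1 46 1).foldl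
    (fun (st : List Int × List Int) i =>
      (st.1 ++ [((st.2.takeWhile (fun x => x == i)).length : Int)],
       st.2.drop (st.2.takeWhile (fun x => x == i)).length))
    ([], flat)
  st.1

-- ===== PRECONDITION & SPEC =====
-- Pre_ excludes exactly the inputs on which A raises KeyError: a selected row without a "nums" key.
def Pre_frequency_counts (rows : List (List (String × List Int))) (recent_k : Int) : Prop :=
  (if recent_k ≠ 0 ∧ 0 < recent_k then PySem.List.slice rows (some (-recent_k)) none else rows).all
    (fun r => (PySem.Dict.mk r).contains "nums") = true
instance (rows : List (List (String × List Int))) (recent_k : Int) : Decidable (Pre_frequency_counts rows recent_k) := by unfold Pre_frequency_counts; infer_instance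
def pvWitness_frequency_counts : (List (List (String × List Int))) × Int := ([[("nums", [1, 2, 3])], [("nums", [3, 50])]], 1)
def Spec_frequency_counts (rows : List (List (String × List Int))) (recent_k : Int) (out : List Int) : Prop := out = frequency_counts_alt rows recent_k
instance (rows : List (List (String × List Int))) (recent_k : Int) (out : List Int) : Decidable (Spec_frequency_counts rows recent_k out) := by unfold Spec_frequency_counts; infer_instance

-- ===== CLAIM (what is proved, stated in full; the proofs are below) =====
def Claim_equal_frequency_counts : Prop := ∀ (rows : List (List (String × List Int))) (recent_k : Int), Dom_frequency_counts rows recent_k → Pre_frequency_counts rows recent_k → Spec_frequency_counts rows recent_k (frequency_counts rows recent_k)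

-- ===== LEMMAS AND PROOFS =====

-- A-side: the counter's entry at i is the count of i among the flattened numbers.
lemma fc_inner (l : List Int) (d : PySem.Dict Int Int) :
    l.foldl (fun d n => if 1 ≤ n ∧ n ≤ 45 then d.modify n 0 (· + 1) else d) d
      = (l.filter (fun n => decide (1 ≤ n ∧ n ≤ 45))).foldl (fun d n => d.modify n 0 (· + 1)) d := by
  induction l generalizing d with
  | nil => rfl
  | cons x xs ih =>
    by_cases h : 1 ≤ x ∧ x ≤ 45 <;> simp [h, ih]

lemma fc_inner_getD (l : List Int) (d : PySem.Dict Int Int) (i : Int) :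
    (l.foldl (fun d n => if 1 ≤ n ∧ n ≤ 45 then d.modify n 0 (· + 1) else d) d).getD i 0
      = d.getD i 0 + (l.filter (fun n => decide (1 ≤ n ∧ n ≤ 45))).count i := by
  rw [fc_inner, PySem.Dict.getD_foldl_modify_add_one]

lemma fc_outer (target : List (List (String × List Int))) (d : PySem.Dict Int Int) (i : Int) :
    (target.foldl
      (fun d r =>
        (((PySem.Dict.mk r).get? "nums").getD []).foldl
          (fun d n => if 1 ≤ n ∧ n ≤ 45 then d.modify n 0 (· + 1) else d) d)
      d).getD i 0
    = d.getD i 0 + (target.flatMap (fun r =>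
        (((PySem.Dict.mk r).get? "nums").getD []).filter (fun n => decide (1 ≤ n ∧ n ≤ 45)))).count i := by
  induction target generalizing d with
  | nil => simp
  | cons r rs ih =>
    simp only [List.foldl_cons, List.flatMap_cons, List.count_append]
    rw [ih, fc_inner_getD]
    push_cast
    ring

-- B-side: one step of the pointer scan on a sorted, lower-bounded list.
lemma fcb_run (l : List Int) (a : Int) (hs : l.Pairwise (· ≤ ·)) (hb : ∀ x ∈ l, a ≤ x) :
    (l.takeWhile (fun x => x == a)).length = l.count a
      ∧ (∀ x ∈ l.dropWhile (fun x => x == a), a + 1 ≤ x)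
      ∧ ∀ b : Int, b ≠ a → (l.dropWhile (fun x => x == a)).count b = l.count b := by
  induction l with
  | nil => simp
  | cons x xs ih =>
    rcases List.pairwise_cons.mp hs with ⟨hx, hxs⟩
    by_cases hxa : x = a
    · subst hxa
      have hb' : ∀ y ∈ xs, x ≤ y := fun y hy => hb y (List.mem_cons_of_mem _ hy)
      rcases ih hxs hb' with ⟨h1, h2, h3⟩
      refine ⟨?_, ?_, ?_⟩
      · simp [h1]
      · simpa [List.dropWhile_cons] using h2
      · intro b hba
        simp only [List.dropWhile_cons, beq_self_eq_true, if_true]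
        rw [h3 b hba, List.count_cons]
        simp [Ne.symm hba]
    · have hax : a < x := lt_of_le_of_ne (hb x (List.mem_cons_self)) (Ne.symm hxa)
      have hnotin : a ∉ x :: xs := by
        intro hmem
        rcases List.mem_cons.mp hmem with h | h
        · exact hxa h.symm
        · exact absurd (hx a h) (not_le.mpr hax)
      refine ⟨?_, ?_, ?_⟩
      · simp [hxa, List.count_eq_zero.mpr hnotin]
      · intro y hy
        rw [List.dropWhile_cons_of_neg (by simp [hxa])] at hy
        rcases List.mem_cons.mp hy with h | h
        · omega
        · have := hx y h; omega
      · intro b _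
        rw [List.dropWhile_cons_of_neg (by simp [hxa])]

-- suffix left after the run: dropping the run's length is dropping the run.
lemma drop_takeWhile_length (p : Int → Bool) (l : List Int) :
    l.drop (l.takeWhile p).length = l.dropWhile p := by
  induction l with
  | nil => rfl
  | cons x xs ih =>
    by_cases h : p x <;> simp [h, ih]

-- B-side: the whole scan over range(a, a+m) produces the counts a, a+1, …, a+m-1.
lemma fcb_fold (m : Nat) (a : Int) (acc l : List Int)
    (hs : l.Pairwise (· ≤ ·)) (hb : ∀ x ∈ l, a ≤ x) :
    ((PySem.List.pyRange a (a + m) 1).foldl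
      (fun (st : List Int × List Int) i =>
        (st.1 ++ [((st.2.takeWhile (fun x => x == i)).length : Int)],
         st.2.drop (st.2.takeWhile (fun x => x == i)).length))
      (acc, l)).1
    = acc ++ (List.range m).map (fun j : Nat => ((l.count (a + (j : Int)) : Int))) := by
  induction m generalizing a acc l with
  | zero =>
    rw [show a + ((0 : Nat) : Int) = a from by norm_num,
      PySem.List.pyRange_one_eq_nil le_rfl]
    simp
  | succ m ih =>
    have hlt : a < a + ((m + 1 : Nat) : Int) := by push_cast; omega
    rw [PySem.List.pyRange_one_cons hlt]
    simp only [List.foldl_cons]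
    rcases fcb_run l a hs hb with ⟨h1, h2, h3⟩
    have heq : a + ((m + 1 : Nat) : Int) = (a + 1) + ((m : Nat) : Int) := by push_cast; ring
    rw [drop_takeWhile_length, heq,
      ih (a + 1) _ _ (List.Pairwise.sublist (List.dropWhile_sublist _) hs) h2]
    rw [List.range_succ_eq_map, List.map_cons, List.map_map]
    simp only [List.append_assoc, List.singleton_append]
    congr 1
    congr 1
    · rw [h1]; norm_num
    apply List.map_congr_left
    intro j hj
    simp only [Function.comp]
    rw [h3 (a + 1 + (j : Int)) (by omega)]
    congr 2
    push_cast
    ring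

-- counting i in the filtered flatten equals counting i in the unfiltered flatten, for in-range i.
lemma count_filter_flat (target : List (List (String × List Int))) (i : Int)
    (hi : 1 ≤ i ∧ i ≤ 45) :
    (target.flatMap (fun r =>
        (((PySem.Dict.mk r).get? "nums").getD []).filter (fun n => decide (1 ≤ n ∧ n ≤ 45)))).count i
    = (target.flatMap (fun r => (((PySem.Dict.mk r).get? "nums").getD []))).count i := by
  induction target with
  | nil => rfl
  | cons r rs ih =>
    simp only [List.flatMap_cons, List.count_append, ih]
    congr 1
    rw [List.count_filter]
    simp [hi.1, hi.2]

-- ===== VERDICT (by name: the statement is the Claim_ definition above) =====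
theorem frequency_counts_spec : Claim_equal_frequency_counts := by
  intro rows recent_k _ _
  unfold Spec_frequency_counts frequency_counts frequency_counts_alt
  set target := if recent_k ≠ 0 ∧ 0 < recent_k then PySem.List.slice rows (some (-recent_k)) none else rows with htarget
  set flatF := target.flatMap (fun r =>
      (((PySem.Dict.mk r).get? "nums").getD []).filter (fun n => decide (1 ≤ n ∧ n ≤ 45))) with hflatF
  set flat := PySem.List.sorted flatF (fun x => x) false with hflat
  have hs : flat.Pairwise (· ≤ ·) := by
    simpa using PySem.List.sorted_pairwise flatF (fun x => x)
  have hmem : ∀ x ∈ flat, (1 : Int) ≤ x ∧ x ≤ 45 := by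
    intro x hx
    have : x ∈ flatF := (PySem.List.mem_sorted _ _ _ _).mp hx
    rcases List.mem_flatMap.mp this with ⟨r, _, hr⟩
    have := List.of_mem_filter hr
    simpa using this
  have hb : ∀ x ∈ flat, (1 : Int) ≤ x := fun x hx => (hmem x hx).1
  have hB := fcb_fold 45 1 [] flat hs hb
  have hrng : (1 : Int) + ((45 : Nat) : Int) = 46 := by norm_num
  rw [hrng] at hB
  rw [hB, List.nil_append, PySem.List.pyRange_one,
    show ((46 : Int) - 1).toNat = 45 from by decide, List.map_map]
  apply List.map_congr_left
  intro j hj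
  simp only [Function.comp]
  rw [fc_outer]
  have hcount : flat.count (1 + (j : Int)) = flatF.count (1 + (j : Int)) :=
    (PySem.List.sorted_perm flatF (fun x => x) false).count_eq _
  have hj45 : j < 45 := List.mem_range.mp hj
  rw [hcount, hflatF, count_filter_flat target _ (by constructor <;> omega)]
  simp
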